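-- pv_equiv track=rewrite | github.com/mjs375/Portfolio | 7kyu/LangScores.py | my_languages
-- ===== SOURCE A (Python) =====
-- def my_languages(results):
--     scores = [] # Get list of passing scores
--     for key, value in results.items():
--         if value >= 60:
--             scores.append(value)
--     scores.sort(reverse=True) # Sort the scores High>>>Low
--     langs = []
--     for score in scores:
--         for k, v in results.items():
--             if score == v: # Re-match score to lang,
--                 langs.append(k) # and add lang to list
--     return langs
-- ===== SOURCE B (Python) =====
-- def my_languages(results):
--     by_score = {}
--     passing = []
--     for k, v in results.items():
--         if v >= 60:
--             passing.append(v)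
--             by_score.setdefault(v, []).append(k)
--     out = []
--     for s in sorted(passing, reverse=True):
--         out += by_score.get(s, [])
--     return out
-- ===== Notes on version B (the rewrite author's own statement) =====
-- stated objective: alternative
-- what changed: Replaced A's per-score rescan of the whole dict by a single grouping pass (score -> keys in insertion order) plus one descending sort of the passing scores, extending the output from the groups; asymptotically O(n log n) vs A's O(n*p) rescans, though a timing run's inputs did not show a measurable speed-up.
import Mathlib
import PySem

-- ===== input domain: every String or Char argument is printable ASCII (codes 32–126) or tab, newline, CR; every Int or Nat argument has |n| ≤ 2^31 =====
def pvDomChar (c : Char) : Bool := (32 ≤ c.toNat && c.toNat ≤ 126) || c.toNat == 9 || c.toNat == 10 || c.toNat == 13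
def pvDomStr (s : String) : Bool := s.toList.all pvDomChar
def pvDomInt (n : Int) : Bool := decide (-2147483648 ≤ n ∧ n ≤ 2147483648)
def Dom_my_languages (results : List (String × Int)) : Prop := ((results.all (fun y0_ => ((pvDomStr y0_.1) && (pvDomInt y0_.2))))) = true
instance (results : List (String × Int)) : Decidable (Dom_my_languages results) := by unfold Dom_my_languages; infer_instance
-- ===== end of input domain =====

-- B replaces A's per-score rescan of the whole input by one grouping pass (score -> keys) plus a sort of the passing scores (alternative algorithm, same measured cost on the probe's inputs).


-- ===== PORT A =====
def my_languages (results : List (String × Int)) : List String :=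
  -- scores = []; for key, value in results.items(): if value >= 60: scores.append(value)
  let scores : List Int :=
    results.foldl (fun acc kv => if kv.2 ≥ 60 then acc ++ [kv.2] else acc) []
  -- scores.sort(reverse=True)
  let scoresSorted := PySem.List.sorted scores (fun x => x) true
  -- langs = []; for score in scores: for k, v in results.items(): if score == v: langs.append(k)
  scoresSorted.foldl
    (fun langs s =>
      results.foldl (fun langs kv => if s = kv.2 then langs ++ [kv.1] else langs) langs)
    []

-- ===== PORT B =====
def my_languages_alt (results : List (String × Int)) : List String :=
  -- one pass: passing scores (with multiplicity) and a dict score -> keys in order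
  let st : List Int × PySem.Dict Int (List String) :=
    results.foldl
      (fun st kv =>
        if kv.2 ≥ 60 then (st.1 ++ [kv.2], st.2.modify kv.2 [] (· ++ [kv.1])) else st)
      ([], PySem.Dict.empty)
  -- out = []; for s in sorted(passing, reverse=True): out += by_score.get(s, [])
  (PySem.List.sorted st.1 (fun x => x) true).foldl (fun out s => out ++ st.2.getD s []) []

-- ===== PRECONDITION & SPEC =====
def Spec_my_languages (results : List (String × Int)) (out : List String) : Prop := out = my_languages_alt results
instance (results : List (String × Int)) (out : List String) : Decidable (Spec_my_languages results out) := by unfold Spec_my_languages; infer_instance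

-- ===== CLAIM (what is proved, stated in full; the proofs are below) =====
def Claim_equal_my_languages : Prop := ∀ (results : List (String × Int)), Dom_my_languages results → Spec_my_languages results (my_languages results)

-- ===== LEMMAS AND PROOFS =====

-- B's single loop is the pair of its two component loops
theorem alt_state_eq (rs : List (String × Int)) (acc : List Int)
    (d : PySem.Dict Int (List String)) :
    rs.foldl
      (fun st kv =>
        if kv.2 ≥ 60 then (st.1 ++ [kv.2], st.2.modify kv.2 [] (· ++ [kv.1])) else st)
      (acc, d)
    = (rs.foldl (fun a kv => if kv.2 ≥ 60 then a ++ [kv.2] else a) acc,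
       rs.foldl (fun e kv => if kv.2 ≥ 60 then e.modify kv.2 [] (· ++ [kv.1]) else e) d) := by
  induction rs generalizing acc d with
  | nil => rfl
  | cons kv t ih =>
    simp only [List.foldl_cons]
    by_cases h : kv.2 ≥ 60 <;> simp [h, ih]

-- the grouping dict, looked up at a passing score, is exactly A's rescan of results
theorem dict_getD_eq (rs : List (String × Int)) (s : Int) (hs : 60 ≤ s) :
    (rs.foldl (fun e kv => if kv.2 ≥ 60 then e.modify kv.2 [] (· ++ [kv.1]) else e)
        (PySem.Dict.empty : PySem.Dict Int (List String))).getD s []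
    = (rs.filter (fun kv => decide (s = kv.2))).map (·.1) := by
  rw [PySem.List.foldl_ite_eq_foldl_filter]
  have hmap :
      (rs.filter (fun kv => decide (kv.2 ≥ 60))).foldl
        (fun e kv => e.modify kv.2 [] (· ++ [kv.1]))
        (PySem.Dict.empty : PySem.Dict Int (List String))
      = ((rs.filter (fun kv => decide (kv.2 ≥ 60))).map (fun kv => (kv.2, kv.1))).foldl
          (fun e p => e.modify p.1 [] (· ++ [p.2])) PySem.Dict.empty := by
    rw [List.foldl_map]
  rw [hmap, PySem.Dict.getD_foldl_modify_append]
  simp only [PySem.Dict.getD_empty, List.nil_append, List.filter_map, List.map_map]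
  rw [List.filter_filter]
  congr 1
  apply List.filter_congr
  intro kv _
  simp only [Function.comp_apply]
  by_cases h : s = kv.2
  · subst h
    simp [hs, ge_iff_le]
  · have h' : kv.2 ≠ s := fun hh => h hh.symm
    simp [h, h']

-- every passing score is ≥ 60
theorem mem_scores_ge (rs : List (String × Int)) (s : Int)
    (h : s ∈ rs.foldl (fun a kv => if kv.2 ≥ 60 then a ++ [kv.2] else a) ([] : List Int)) :
    60 ≤ s := by
  simp only [PySem.List.foldl_append_ite (p := fun kv : String × Int => kv.2 ≥ 60) (f := fun kv => kv.2)] at h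
  simp only [List.nil_append, List.mem_map, List.mem_filter, decide_eq_true_eq] at h
  obtain ⟨kv, ⟨_, hge⟩, heq⟩ := h
  omega

-- ===== VERDICT (by name: the statement is the Claim_ definition above) =====
theorem my_languages_spec : Claim_equal_my_languages := by
  intro results _
  unfold Spec_my_languages my_languages my_languages_alt
  rw [alt_state_eq]
  apply PySem.List.foldl_congr_mem
  intro acc s hs
  have h60 : 60 ≤ s := mem_scores_ge results s ((PySem.List.mem_sorted _ _ _ _).1 hs)
  rw [PySem.List.foldl_append_ite (p := fun kv : String × Int => s = kv.2) (f := fun kv => kv.1),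
      dict_getD_eq results s h60]
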